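-- pv_equiv track=rewrite | github.com/tefj-fun/agent_bus | src/agents/feature_tree_agent.py | _has_existing_context
-- ===== SOURCE A (Python) =====
-- def _has_existing_context(requirements: str, prd_content: str) -> bool:
--     haystack = f"{requirements}\n{prd_content}".lower()
--     return any(
--         term in haystack
--         for term in (
--             "existing",
--             "current",
--             "legacy",
--             "migrate",
--             "migration",
--             "upgrade",
--             "extend",
--             "enhance",
--             "brownfield",
--         )
--     )
-- ===== SOURCE B (Python) =====
-- _BY_FIRST = {
--     "e": ("existing", "extend", "enhance"),
--     "c": ("current",),
--     "l": ("legacy",),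
--     "m": ("migrate", "migration"),
--     "u": ("upgrade",),
--     "b": ("brownfield",),
-- }
--
--
-- def _has_existing_context(requirements: str, prd_content: str) -> bool:
--     haystack = (requirements + "\n" + prd_content).lower()
--     for i, ch in enumerate(haystack):
--         for term in _BY_FIRST.get(ch, ()):
--             if haystack.startswith(term, i):
--                 return True
--     return False
-- ===== Notes on version B (the rewrite author's own statement) =====
-- stated objective: alternative
-- what changed: B replaces A's nine independent substring scans with a first-letter dictionary index and one left-to-right scan that at each position tests only the terms whose first letter matches the current character.
import Mathlib
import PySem

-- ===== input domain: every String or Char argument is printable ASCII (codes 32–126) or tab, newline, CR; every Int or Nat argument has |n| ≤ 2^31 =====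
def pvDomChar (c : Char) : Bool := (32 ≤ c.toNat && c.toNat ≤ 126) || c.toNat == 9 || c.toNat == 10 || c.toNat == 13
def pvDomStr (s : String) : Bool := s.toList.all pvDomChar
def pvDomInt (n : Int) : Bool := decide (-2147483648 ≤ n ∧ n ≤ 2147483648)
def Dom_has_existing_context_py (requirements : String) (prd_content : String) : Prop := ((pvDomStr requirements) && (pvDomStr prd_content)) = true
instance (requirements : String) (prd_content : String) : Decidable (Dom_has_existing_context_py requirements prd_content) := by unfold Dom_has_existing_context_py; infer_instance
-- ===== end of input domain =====

-- B indexes the nine terms by first letter and does ONE left-to-right scan of the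
-- haystack, testing at each position only the terms filed under the current character,
-- instead of A's nine independent substring scans; objective: alternative.

-- ===== PORT A =====
-- A's tuple of terms, term-major: `any(term in haystack for term in …)`
def pvTermsA : List (List Char) :=
  ["existing".toList, "current".toList, "legacy".toList, "migrate".toList,
   "migration".toList, "upgrade".toList, "extend".toList, "enhance".toList,
   "brownfield".toList]

def has_existing_context_py (requirements : String) (prd_content : String) : Bool :=
  -- haystack = f"{requirements}\n{prd_content}".lower()  (on the List Char side, exact)
  let haystack := PySem.Chars.lower (requirements.toList ++ '\n' :: prd_content.toList)
  pvTermsA.any (fun term => PySem.Chars.isIn term haystack)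

-- ===== PORT B =====
-- the module-level `_BY_FIRST` dict: first letter ↦ terms starting with it
def pvByFirst : PySem.Dict Char (List (List Char)) :=
  PySem.Dict.ofList
  [('e', [['e','x','i','s','t','i','n','g'], ['e','x','t','e','n','d'], ['e','n','h','a','n','c','e']]),
   ('c', [['c','u','r','r','e','n','t']]),
   ('l', [['l','e','g','a','c','y']]),
   ('m', [['m','i','g','r','a','t','e'], ['m','i','g','r','a','t','i','o','n']]),
   ('u', [['u','p','g','r','a','d','e']]),
   ('b', [['b','r','o','w','n','f','i','e','l','d']])]

-- the `for i, ch in enumerate(haystack)` loop as structural recursion on the suffix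
def pvScanB : List Char → Bool
  | [] => false
  | ch :: rest =>
    if (PySem.Dict.getD pvByFirst ch []).any
         (fun term => PySem.Chars.startswith (ch :: rest) term) then true
    else pvScanB rest

def has_existing_context_py_alt (requirements : String) (prd_content : String) : Bool :=
  pvScanB (PySem.Chars.lower (requirements.toList ++ '\n' :: prd_content.toList))

-- ===== PRECONDITION & SPEC =====
def Spec_has_existing_context_py (requirements : String) (prd_content : String) (out : Bool) : Prop := out = has_existing_context_py_alt requirements prd_content
instance (requirements : String) (prd_content : String) (out : Bool) : Decidable (Spec_has_existing_context_py requirements prd_content out) := by unfold Spec_has_existing_context_py; infer_instance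

-- ===== CLAIM =====
def Claim_equal_has_existing_context_py : Prop := ∀ (requirements : String) (prd_content : String), Dom_has_existing_context_py requirements prd_content → Spec_has_existing_context_py requirements prd_content (has_existing_context_py requirements prd_content)

-- ===== LEMMAS AND PROOFS =====

-- startswith on a cons target against a cons pattern: head test then tail
theorem sw_cons (c h : Char) (rest ts : List Char) :
    PySem.Chars.startswith (c :: rest) (h :: ts)
      = ((h == c) && PySem.Chars.startswith rest ts) := by
  rw [Bool.eq_iff_iff]
  simp [PySem.Chars.startswith_iff, List.cons_prefix_cons]

-- pvTermsA with the string literals evaluated to character lists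
theorem termsA_eval :
    pvTermsA =
      [['e','x','i','s','t','i','n','g'], ['c','u','r','r','e','n','t'],
       ['l','e','g','a','c','y'], ['m','i','g','r','a','t','e'],
       ['m','i','g','r','a','t','i','o','n'], ['u','p','g','r','a','d','e'],
       ['e','x','t','e','n','d'], ['e','n','h','a','n','c','e'],
       ['b','r','o','w','n','f','i','e','l','d']] := by rfl

-- at a fixed position, the first-letter index tests the same terms as the full tuple:
-- a term whose first letter differs from the current character can never match here
theorem index_eq_all (c : Char) (rest : List Char) :
    (PySem.Dict.getD pvByFirst c []).any
        (fun term => PySem.Chars.startswith (c :: rest) term)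
      = pvTermsA.any (fun t => PySem.Chars.startswith (c :: rest) t) := by
  rw [termsA_eval]
  by_cases he : c = 'e'
  · subst he
    rw [show PySem.Dict.getD pvByFirst 'e' []
          = [['e','x','i','s','t','i','n','g'], ['e','x','t','e','n','d'],
             ['e','n','h','a','n','c','e']] from by decide]
    simp [sw_cons]
  by_cases hc : c = 'c'
  · subst hc
    rw [show PySem.Dict.getD pvByFirst 'c' [] = [['c','u','r','r','e','n','t']] from by decide]
    simp [sw_cons]
  by_cases hl : c = 'l'
  · subst hl
    rw [show PySem.Dict.getD pvByFirst 'l' [] = [['l','e','g','a','c','y']] from by decide]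
    simp [sw_cons]
  by_cases hm : c = 'm'
  · subst hm
    rw [show PySem.Dict.getD pvByFirst 'm' []
          = [['m','i','g','r','a','t','e'], ['m','i','g','r','a','t','i','o','n']] from by decide]
    simp [sw_cons]
  by_cases hu : c = 'u'
  · subst hu
    rw [show PySem.Dict.getD pvByFirst 'u' [] = [['u','p','g','r','a','d','e']] from by decide]
    simp [sw_cons]
  by_cases hb : c = 'b'
  · subst hb
    rw [show PySem.Dict.getD pvByFirst 'b' [] = [['b','r','o','w','n','f','i','e','l','d']] from by decide]
    simp [sw_cons]
  · have he' : ('e' == c) = false := by simp [Ne.symm he]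
    have hc' : ('c' == c) = false := by simp [Ne.symm hc]
    have hl' : ('l' == c) = false := by simp [Ne.symm hl]
    have hm' : ('m' == c) = false := by simp [Ne.symm hm]
    have hu' : ('u' == c) = false := by simp [Ne.symm hu]
    have hb' : ('b' == c) = false := by simp [Ne.symm hb]
    rw [show pvByFirst
          = PySem.Dict.mk
            [('e', [['e','x','i','s','t','i','n','g'], ['e','x','t','e','n','d'],
                    ['e','n','h','a','n','c','e']]),
             ('c', [['c','u','r','r','e','n','t']]),
             ('l', [['l','e','g','a','c','y']]),
             ('m', [['m','i','g','r','a','t','e'], ['m','i','g','r','a','t','i','o','n']]),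
             ('u', [['u','p','g','r','a','d','e']]),
             ('b', [['b','r','o','w','n','f','i','e','l','d']])] from by decide]
    simp [PySem.Dict.getD, PySem.Dict.get?, sw_cons, he', hc', hl', hm', hu', hb']

-- substring membership on a cons: match at the head position or anywhere in the tail
theorem isIn_cons (t : List Char) (c : Char) (rest : List Char) :
    PySem.Chars.isIn t (c :: rest)
      = (PySem.Chars.startswith (c :: rest) t || PySem.Chars.isIn t rest) := by
  rw [Bool.eq_iff_iff]
  simp [PySem.Chars.isIn_iff_infix, PySem.Chars.startswith_iff, List.infix_cons_iff]

-- any over a pointwise disjunction splits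
theorem any_or {a : Type} (l : List a) (f g : a -> Bool) :
    (l.any fun x => f x || g x) = (l.any f || l.any g) := by
  rw [Bool.eq_iff_iff]
  simp [List.any_eq_true, and_or_left, exists_or]

-- the single indexed scan computes exactly A\'s term-major multi-substring search
theorem scanB_eq (hs : List Char) :
    pvScanB hs = pvTermsA.any (fun t => PySem.Chars.isIn t hs) := by
  induction hs with
  | nil => decide
  | cons c rest ih =>
    rw [pvScanB, index_eq_all]
    simp only [isIn_cons, any_or, <- ih]
    split_ifs with h <;> simp [h]

-- ===== VERDICT =====
theorem has_existing_context_py_spec : Claim_equal_has_existing_context_py := by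
  intro requirements prd_content _
  unfold Spec_has_existing_context_py has_existing_context_py has_existing_context_py_alt
  exact (scanB_eq _).symm
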